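-- pv_equiv track=rewrite | github.com/marcmiras/AOC_2023 | AOC7/main.py | categorize_hands
-- ===== SOURCE A (Python) =====
-- def is_single(card_counts, jokers):
--     return len(card_counts) < 2
--
-- def is_four_of_a_kind(card_counts, jokers):
--     return max(card_counts.values()) + jokers == 4
--
-- def is_full_house(card_counts, jokers):
--     values = list(card_counts.values())
--
--     if len(values) == 2:
--         count_2 = 0
--         count_3 = 0
--
--         for value in values:
--             if value == 2:
--                 count_2 += 1
--             elif value == 3:
--                 count_3 += 1
--
--         if (count_2 == 1 and count_3 == 1) or (count_2 == 2 and jokers == 1):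
--             return True
--
--     return False
--
-- def is_three_of_a_kind(card_counts, jokers):
--     for value in card_counts.values():
--         if value == (3 - jokers):
--             return True
--     return False
--
-- def is_two_pair(card_counts, jokers):
--     values = list(card_counts.values())
--
--     if 2 in values and values.count(2) == 2:
--         return True
--     elif jokers > 0 and 2 in values:
--         return True
--
--     return False
--
-- def is_one_pair(card_counts, jokers):
--     for value in card_counts.values():
--         if value == (2 - jokers):
--             return True
--     return False
--
-- def categorize_hands(hands_data, is_part_two):
--     sorted_hands = []
--     for _ in range(7):
--         sorted_hands.append([])
--
--     for card, bid in hands_data: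
--         card_counts = {}
--         for c in card:
--             if c in card_counts:
--                 card_counts[c] += 1
--             else:
--                 card_counts[c] = 1
--
--         if is_part_two:
--             jokers = card_counts.get("J", 0)
--             if "J" in card_counts:
--                 del card_counts["J"]
--         else:
--             jokers = 0
--
--         hand_type_index = 6
--         for i in range(6):
--             if i == 0 and is_single(card_counts, jokers):
--                 hand_type_index = i
--                 break
--             elif i == 1 and is_four_of_a_kind(card_counts, jokers):
--                 hand_type_index = i
--                 break
--             elif i == 2 and is_full_house(card_counts, jokers):
--                 hand_type_index = i
--                 break
--             elif i == 3 and is_three_of_a_kind(card_counts, jokers):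
--                 hand_type_index = i
--                 break
--             elif i == 4 and is_two_pair(card_counts, jokers):
--                 hand_type_index = i
--                 break
--             elif i == 5 and is_one_pair(card_counts, jokers):
--                 hand_type_index = i
--                 break
--
--         sorted_hands[hand_type_index].append((card, bid))
--
--     return sorted_hands
-- ===== SOURCE B (Python) =====
-- def _hand_index(card, is_part_two):
--     # classify one hand: count cards, then index the classification off a
--     # frequency-of-frequencies table (meta) with O(1) lookups instead of
--     # re-scanning the count values per predicate
--     counts = {}
--     for c in card:
--         counts[c] = counts.get(c, 0) + 1
--     j = counts.pop("J", 0) if is_part_two else 0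
--     meta = {}
--     m = 0
--     for v in counts.values():
--         meta[v] = meta.get(v, 0) + 1
--         if m < v:
--             m = v
--     if len(counts) < 2:
--         return 0
--     if m + j == 4:
--         return 1
--     if len(counts) == 2 and ((meta.get(2, 0) == 1 and meta.get(3, 0) == 1)
--                              or (meta.get(2, 0) == 2 and j == 1)):
--         return 2
--     if meta.get(3 - j, 0) > 0:
--         return 3
--     if meta.get(2, 0) == 2 or (j > 0 and meta.get(2, 0) > 0):
--         return 4
--     if meta.get(2 - j, 0) > 0:
--         return 5
--     return 6
--
-- def categorize_hands(hands_data, is_part_two):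
--     # build the 7 buckets by seven order-preserving filter passes
--     return [[(card, bid) for card, bid in hands_data if _hand_index(card, is_part_two) == k]
--             for k in range(7)]
-- ===== Notes on version B (the rewrite author's own statement) =====
-- stated objective: alternative
-- what changed: A distributes hands into the 7 buckets in one fold, classifying each by a six-iteration range loop with breaks over six predicate helpers that each re-scan the counts dict; B classifies by O(1) lookups into a frequency-of-frequencies table (and a running max) built in one pass over the counts, and builds the output as seven order-preserving filter comprehensions over the input instead of a distributing loop - trading the single distribution pass for seven filter passes that recompute the index.
import Mathlib
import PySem

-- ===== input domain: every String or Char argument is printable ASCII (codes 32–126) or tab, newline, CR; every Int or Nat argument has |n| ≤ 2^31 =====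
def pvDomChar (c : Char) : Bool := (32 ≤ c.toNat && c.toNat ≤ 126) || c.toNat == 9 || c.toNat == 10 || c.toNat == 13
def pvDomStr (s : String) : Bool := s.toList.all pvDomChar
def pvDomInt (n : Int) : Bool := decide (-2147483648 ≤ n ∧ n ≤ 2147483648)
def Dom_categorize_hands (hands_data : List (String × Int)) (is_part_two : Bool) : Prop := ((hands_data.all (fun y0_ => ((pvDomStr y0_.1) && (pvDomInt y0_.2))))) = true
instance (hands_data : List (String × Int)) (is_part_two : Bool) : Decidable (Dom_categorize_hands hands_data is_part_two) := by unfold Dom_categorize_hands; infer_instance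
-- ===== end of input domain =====

-- B classifies each hand by O(1) lookups into a frequency-of-frequencies table built in one
-- pass (instead of A's six-predicate cascade rescanning the counts) and builds the 7 buckets
-- by seven order-preserving filter passes (instead of A's distributing fold); objective: alternative.


-- ===== PORT A =====
-- card_counts built by A's membership-test loop: if c in dict then dict[c] += 1 else dict[c] = 1
def pvBuildCountsA (card : List Char) : PySem.Dict Char Int :=
  card.foldl
    (fun cc c => if cc.contains c then cc.insert c (cc.getD c 0 + 1) else cc.insert c 1)
    PySem.Dict.empty

def pvIsSingle (cc : PySem.Dict Char Int) (_jokers : Int) : Bool :=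
  decide (cc.size < 2)

-- Python's max() raises on an empty dict; in A that call is unreachable (guarded by is_single),
-- so the `none` branch below is dead code.
def pvIsFourOfAKind (cc : PySem.Dict Char Int) (jokers : Int) : Bool :=
  match PySem.List.max? cc.values (fun v => v) with
  | some m => m + jokers == 4
  | none => false

def pvIsFullHouse (cc : PySem.Dict Char Int) (jokers : Int) : Bool :=
  let values := cc.values
  if values.length == 2 then
    let p := values.foldl
      (fun (p : Int × Int) v =>
        if v == 2 then (p.1 + 1, p.2) else if v == 3 then (p.1, p.2 + 1) else p)
      (0, 0)
    (p.1 == 1 && p.2 == 1) || (p.1 == 2 && jokers == 1)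
  else false

def pvIsThreeOfAKind (cc : PySem.Dict Char Int) (jokers : Int) : Bool :=
  cc.values.any (fun v => v == 3 - jokers)

def pvIsTwoPair (cc : PySem.Dict Char Int) (jokers : Int) : Bool :=
  let values := cc.values
  if values.contains 2 && PySem.List.count values 2 == 2 then true
  else if decide (0 < jokers) && values.contains 2 then true
  else false

def pvIsOnePair (cc : PySem.Dict Char Int) (jokers : Int) : Bool :=
  cc.values.any (fun v => v == 2 - jokers)

-- A's `for i in range(6): if i == k and pred_k: hand_type_index = i; break` loop (default 6)
def pvFindType (cc : PySem.Dict Char Int) (jokers : Int) : List Int → Int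
  | [] => 6
  | i :: rest =>
    if i == 0 && pvIsSingle cc jokers then i
    else if i == 1 && pvIsFourOfAKind cc jokers then i
    else if i == 2 && pvIsFullHouse cc jokers then i
    else if i == 3 && pvIsThreeOfAKind cc jokers then i
    else if i == 4 && pvIsTwoPair cc jokers then i
    else if i == 5 && pvIsOnePair cc jokers then i
    else pvFindType cc jokers rest

def categorize_hands (hands_data : List (String × Int)) (is_part_two : Bool) : List (List (String × Int)) :=
  let sorted_hands : List (List (String × Int)) :=
    (PySem.List.pyRange 0 7 1).foldl (fun acc _ => acc ++ [[]]) []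
  hands_data.foldl
    (fun sorted_hands hand =>
      let cc0 := pvBuildCountsA hand.1.toList
      let jokers : Int := if is_part_two then cc0.getD 'J' 0 else 0
      let cc := if is_part_two && cc0.contains 'J' then cc0.erase 'J' else cc0
      let idx := pvFindType cc jokers (PySem.List.pyRange 0 6 1)
      -- idx ∈ {0,…,6}, so the Python list index is nonnegative: .toNat is exact here
      sorted_hands.modify idx.toNat (· ++ [hand]))
    sorted_hands

-- ===== PORT B =====
-- counts built with dict.get: counts[c] = counts.get(c, 0) + 1
def pvBuildCountsB (card : List Char) : PySem.Dict Char Int :=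
  card.foldl (fun cc c => cc.insert c (cc.getD c 0 + 1)) PySem.Dict.empty

-- _hand_index of Source B: counts, pop of J, one pass building meta (frequency of frequencies)
-- and the running max m, then the arithmetic lookup chain
def pvHandIndex (card : List Char) (is_part_two : Bool) : Int :=
  let counts0 := pvBuildCountsB card
  let j : Int := if is_part_two then counts0.getD 'J' 0 else 0
  -- counts.pop("J", 0): the value was read above; pop removes the key (no-op when absent)
  let counts := if is_part_two then counts0.erase 'J' else counts0
  let p := counts.values.foldl
      (fun (p : PySem.Dict Int Int × Int) v =>
        (p.1.insert v (p.1.getD v 0 + 1), if p.2 < v then v else p.2))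
      (PySem.Dict.empty, 0)
  let fr := p.1
  let m := p.2
  if counts.size < 2 then 0
  else if m + j == 4 then 1
  else if counts.size == 2 && ((fr.getD 2 0 == 1 && fr.getD 3 0 == 1)
        || (fr.getD 2 0 == 2 && j == 1)) then 2
  else if decide (0 < fr.getD (3 - j) 0) then 3
  else if fr.getD 2 0 == 2 || (decide (0 < j) && decide (0 < fr.getD 2 0)) then 4
  else if decide (0 < fr.getD (2 - j) 0) then 5
  else 6

def categorize_hands_alt (hands_data : List (String × Int)) (is_part_two : Bool) : List (List (String × Int)) :=
  (PySem.List.pyRange 0 7 1).map (fun k =>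
    hands_data.filter (fun hand => pvHandIndex hand.1.toList is_part_two == k))

-- ===== PRECONDITION & SPEC =====
def Spec_categorize_hands (hands_data : List (String × Int)) (is_part_two : Bool) (out : List (List (String × Int))) : Prop := out = categorize_hands_alt hands_data is_part_two
instance (hands_data : List (String × Int)) (is_part_two : Bool) (out : List (List (String × Int))) : Decidable (Spec_categorize_hands hands_data is_part_two out) := by unfold Spec_categorize_hands; infer_instance

-- ===== CLAIM (what is proved, stated in full; the proofs are below) =====
def Claim_equal_categorize_hands : Prop := ∀ (hands_data : List (String × Int)) (is_part_two : Bool), Dom_categorize_hands hands_data is_part_two → Spec_categorize_hands hands_data is_part_two (categorize_hands hands_data is_part_two)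

-- ===== LEMMAS AND PROOFS =====

-- A's per-hand index computation, named so the proofs can talk about it
def pvIdxA (is_part_two : Bool) (hand : String × Int) : Int :=
  let cc0 := pvBuildCountsA hand.1.toList
  let jokers : Int := if is_part_two then cc0.getD 'J' 0 else 0
  let cc := if is_part_two && cc0.contains 'J' then cc0.erase 'J' else cc0
  pvFindType cc jokers (PySem.List.pyRange 0 6 1)

lemma pvBuild_eq (card : List Char) : pvBuildCountsA card = pvBuildCountsB card := by
  unfold pvBuildCountsA pvBuildCountsB
  suffices h : ∀ (cs : List Char) (d : PySem.Dict Char Int),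
      cs.foldl (fun cc c => if cc.contains c then cc.insert c (cc.getD c 0 + 1) else cc.insert c 1) d
      = cs.foldl (fun cc c => cc.insert c (cc.getD c 0 + 1)) d from h card _
  intro cs
  induction cs with
  | nil => intro d; rfl
  | cons c cs ih =>
    intro d
    simp only [List.foldl_cons]
    rw [ih]
    congr 1
    by_cases h : d.contains c = true
    · simp [h]
    · simp only [Bool.not_eq_true] at h
      simp [h, PySem.Dict.getD_of_not_contains d 0 h]

lemma pvErase_of_not_contains (d : PySem.Dict Char Int) (k : Char)
    (h : d.contains k = false) : d.erase k = d := by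
  apply PySem.Dict.ext
  simp only [PySem.Dict.erase]
  rw [List.filter_eq_self]
  intro p hp
  simp only [PySem.Dict.contains, List.any_eq_false] at h
  simpa using h p hp

lemma pvSingle_eq (cc : PySem.Dict Char Int) (j : Int) :
    pvIsSingle cc j = decide (cc.values.length < 2) := by
  simp [pvIsSingle, PySem.Dict.size, PySem.Dict.values]

lemma pvFHCount (vs : List Int) (a b : Int) :
    vs.foldl (fun (p : Int × Int) v =>
        if v == 2 then (p.1 + 1, p.2) else if v == 3 then (p.1, p.2 + 1) else p) (a, b)
    = (a + vs.count 2, b + vs.count 3) := by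
  induction vs generalizing a b with
  | nil => simp
  | cons v vs ih =>
    rw [List.foldl_cons]
    by_cases h2 : v = 2
    · subst h2
      rw [if_pos (by simp), ih]
      simp [Prod.ext_iff]
      omega
    · by_cases h3 : v = 3
      · subst h3
        rw [if_neg (by simp), if_pos (by simp), ih]
        simp [Prod.ext_iff]
        omega
      · rw [if_neg (by simp [h2]), if_neg (by simp [h3]), ih]
        simp [h2, h3]

lemma pvFH_eq (cc : PySem.Dict Char Int) (j : Int) :
    pvIsFullHouse cc j
    = (cc.values.length == 2 && ((PySem.List.count cc.values 2 == 1 && PySem.List.count cc.values 3 == 1)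
        || (PySem.List.count cc.values 2 == 2 && j == 1))) := by
  unfold pvIsFullHouse
  simp only [pvFHCount, PySem.List.count_eq]
  rw [Bool.eq_iff_iff]
  constructor
  · intro hA
    split_ifs at hA with hl
    · simp only [beq_iff_eq] at hl
      simp only [Bool.and_eq_true, Bool.or_eq_true, beq_iff_eq] at hA ⊢
      exact ⟨hl, by omega⟩
  · intro hB
    simp only [Bool.and_eq_true, Bool.or_eq_true, beq_iff_eq] at hB
    rw [if_pos (by simp [hB.1])]
    simp only [Bool.or_eq_true, Bool.and_eq_true, beq_iff_eq]
    omega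

lemma pvThree_eq (cc : PySem.Dict Char Int) (j : Int) :
    pvIsThreeOfAKind cc j = cc.values.contains (3 - j) := by
  simp [pvIsThreeOfAKind, List.any_beq']

lemma pvOne_eq (cc : PySem.Dict Char Int) (j : Int) :
    pvIsOnePair cc j = cc.values.contains (2 - j) := by
  simp [pvIsOnePair, List.any_beq']

lemma pvTP_eq (cc : PySem.Dict Char Int) (j : Int) :
    pvIsTwoPair cc j
    = (PySem.List.count cc.values 2 == 2
        || (decide (0 < j) && decide (0 < PySem.List.count cc.values 2))) := by
  unfold pvIsTwoPair
  simp only [PySem.List.count_eq]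
  rw [Bool.eq_iff_iff]
  have hmem : cc.values.contains 2 = true ↔ 0 < List.count 2 cc.values := by
    simp [List.count_pos_iff]
  constructor
  · intro h
    split_ifs at h with h1 h2
    · simp only [Bool.and_eq_true, beq_iff_eq] at h1
      simp [h1.2]
    · simp only [Bool.and_eq_true, decide_eq_true_eq] at h2
      simp [h2.1, hmem.mp h2.2]
  · intro h
    simp only [Bool.or_eq_true, Bool.and_eq_true, beq_iff_eq, decide_eq_true_eq] at h
    split_ifs with h1 h2
    · rfl
    · rfl
    · exfalso
      rcases h with hc | ⟨hj, hc⟩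
      · have hm2 : 2 ∈ cc.values := by rw [← List.count_pos_iff]; omega
        exact h1 (by simp [hc, hm2])
      · have hm2 : 2 ∈ cc.values := by rw [← List.count_pos_iff]; omega
        exact h2 (by simp [hj, hm2])

lemma pvCascade (cc : PySem.Dict Char Int) (j : Int) :
    pvFindType cc j [0, 1, 2, 3, 4, 5]
    = (if pvIsSingle cc j then 0
       else if pvIsFourOfAKind cc j then 1
       else if pvIsFullHouse cc j then 2
       else if pvIsThreeOfAKind cc j then 3
       else if pvIsTwoPair cc j then 4
       else if pvIsOnePair cc j then 5
       else 6) := by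
  simp only [pvFindType]
  cases h0 : pvIsSingle cc j <;>
    cases h1 : pvIsFourOfAKind cc j <;>
      cases h2 : pvIsFullHouse cc j <;>
        cases h3 : pvIsThreeOfAKind cc j <;>
          cases h4 : pvIsTwoPair cc j <;>
            cases h5 : pvIsOnePair cc j <;>
              simp

-- the values of the counting dict are the positive multiplicities of the cards
lemma pvValuesB_pos (card : List Char) (v : Int) (hv : v ∈ (pvBuildCountsB card).values) :
    1 ≤ v := by
  rw [pvBuildCountsB, PySem.Dict.foldl_insert_getD_add_one_eq_counter] at hv
  simp only [PySem.Dict.values] at hv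
  rw [PySem.Dict.items_counter] at hv
  simp only [List.map_map, List.mem_map] at hv
  obtain ⟨k, hk, hkv⟩ := hv
  rw [PySem.Set.mem_ofList] at hk
  have : 0 < card.count k := List.count_pos_iff.mpr hk
  simp only [Function.comp] at hkv
  omega

lemma pvValuesErase_sub (d : PySem.Dict Char Int) (k : Char) (v : Int)
    (hv : v ∈ (d.erase k).values) : v ∈ d.values := by
  simp only [PySem.Dict.values, PySem.Dict.erase, List.mem_map] at hv ⊢
  obtain ⟨p, hp, hpv⟩ := hv
  exact ⟨p, List.mem_of_mem_filter hp, hpv⟩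

-- the counts dict B's classification actually reads (after the pop of 'J')
lemma pvCountsB_pos (card : List Char) (p2 : Bool) (v : Int)
    (hv : v ∈ (if p2 then (pvBuildCountsB card).erase 'J' else pvBuildCountsB card).values) :
    1 ≤ v := by
  cases p2 with
  | false => exact pvValuesB_pos card v hv
  | true => exact pvValuesB_pos card v (pvValuesErase_sub _ _ _ hv)

-- A's cascade equals B's meta-table chain, for any counts dict with positive values
lemma pvCascadeMeta (cc : PySem.Dict Char Int) (j : Int)
    (hpos : ∀ v ∈ cc.values, 1 ≤ v) :
    pvFindType cc j (PySem.List.pyRange 0 6 1)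
    = (let p := cc.values.foldl
          (fun (p : PySem.Dict Int Int × Int) v =>
            (p.1.insert v (p.1.getD v 0 + 1), if p.2 < v then v else p.2))
          (PySem.Dict.empty, 0)
       if cc.size < 2 then 0
       else if p.2 + j == 4 then 1
       else if cc.size == 2 && ((p.1.getD 2 0 == 1 && p.1.getD 3 0 == 1)
             || (p.1.getD 2 0 == 2 && j == 1)) then 2
       else if decide (0 < p.1.getD (3 - j) 0) then 3
       else if p.1.getD 2 0 == 2 || (decide (0 < j) && decide (0 < p.1.getD 2 0)) then 4
       else if decide (0 < p.1.getD (2 - j) 0) then 5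
       else 6) := by
  have hr : PySem.List.pyRange 0 6 1 = [0, 1, 2, 3, 4, 5] := by decide
  rw [hr, pvCascade]
  rw [PySem.List.foldl_prod_mk
    (f := fun (d : PySem.Dict Int Int) v => d.insert v (d.getD v 0 + 1))
    (g := fun (a : Int) v => if a < v then v else a)]
  have hmeta : ∀ x : Int,
      (cc.values.foldl (fun (d : PySem.Dict Int Int) v => d.insert v (d.getD v 0 + 1))
        PySem.Dict.empty).getD x 0 = (cc.values.count x : Int) := by
    intro x
    rw [PySem.Dict.foldl_insert_getD_add_one_eq_counter, PySem.Dict.getD_counter]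
  have hsize : cc.size = cc.values.length := by
    simp [PySem.Dict.size, PySem.Dict.values]
  -- the outermost branch: both sides test "fewer than two distinct cards"
  rw [pvSingle_eq]
  by_cases hS : cc.values.length < 2
  · simp [hS, hsize]
  · -- at least two values: name them so max() is defined
    obtain ⟨x, t, hxt⟩ : ∃ x t, cc.values = x :: t := by
      cases hcc : cc.values with
      | nil => rw [hcc] at hS; simp at hS
      | cons x t => exact ⟨x, t, rfl⟩
    have hx1 : (1 : Int) ≤ x := hpos x (by rw [hxt]; exact List.mem_cons_self)
    have hmax : (cc.values.foldl (fun (a : Int) v => if a < v then v else a) 0)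
        = match PySem.List.max? cc.values (fun v => v) with
          | some m => m
          | none => 0 := by
      rw [hxt, PySem.List.max?_id_cons]
      have hstep : (fun (a v : Int) => if a < v then v else a) = max := by
        funext a v
        rw [max_def]
        split_ifs <;> omega
      rw [List.foldl_cons, hstep]
      have h0x : (if (0:Int) < x then x else 0) = x := by omega
      rw [h0x]
    have hfour : pvIsFourOfAKind cc j
        = ((cc.values.foldl (fun (a : Int) v => if a < v then v else a) 0) + j == 4) := by
      rw [hmax]
      unfold pvIsFourOfAKind
      rw [hxt, PySem.List.max?_id_cons]
    have hcount : ∀ n : Nat, ∀ y : Int,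
        (PySem.List.count cc.values y == n) = ((cc.values.count y : Int) == (n : Int)) := by
      intro n y
      rw [Bool.eq_iff_iff]
      simp [PySem.List.count_eq]
    have hcontains : ∀ y : Int,
        (cc.values.contains y) = decide (0 < (cc.values.count y : Int)) := by
      intro y
      rw [Bool.eq_iff_iff]
      simp [List.count_pos_iff]
    rw [pvFH_eq, pvThree_eq, pvTP_eq, pvOne_eq, hfour]
    simp only [hmeta, hcount, hcontains, hsize]
    have hTP : (decide (0 < PySem.List.count cc.values 2))
        = decide ((0:Int) < (cc.values.count 2 : Int)) := by
      rw [Bool.eq_iff_iff]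
      simp [PySem.List.count_eq]
    rw [hTP]
    simp [hS]

-- A's per-hand index is B's
lemma pvIdx_eq (p2 : Bool) (hand : String × Int) :
    pvIdxA p2 hand = pvHandIndex hand.1.toList p2 := by
  have hdict : (if p2 && (pvBuildCountsB hand.1.toList).contains 'J'
        then (pvBuildCountsB hand.1.toList).erase 'J' else pvBuildCountsB hand.1.toList)
      = (if p2 then (pvBuildCountsB hand.1.toList).erase 'J'
        else pvBuildCountsB hand.1.toList) := by
    cases p2
    · simp
    · simp only [Bool.true_and]
      by_cases hJ : (pvBuildCountsB hand.1.toList).contains 'J' = true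
      · simp [hJ]
      · simp only [Bool.not_eq_true] at hJ
        simp [hJ, pvErase_of_not_contains _ _ hJ]
  simp only [pvIdxA, pvHandIndex, pvBuild_eq, hdict]
  exact pvCascadeMeta _ _ (pvCountsB_pos hand.1.toList p2)

-- an if-chain with literal results 0..6 is bounded by 0 and 6
lemma pvChainBounds (c0 c1 c2 c3 c4 c5 : Prop)
    [Decidable c0] [Decidable c1] [Decidable c2] [Decidable c3] [Decidable c4] [Decidable c5] :
    0 ≤ (if c0 then (0:Int) else if c1 then 1 else if c2 then 2 else if c3 then 3
          else if c4 then 4 else if c5 then 5 else 6)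
    ∧ (if c0 then (0:Int) else if c1 then 1 else if c2 then 2 else if c3 then 3
          else if c4 then 4 else if c5 then 5 else 6) ≤ 6 := by
  split_ifs <;> omega

-- B's index (hence A's) is one of 0..6
lemma pvHandIndex_bounds (card : List Char) (p2 : Bool) :
    0 ≤ pvHandIndex card p2 ∧ pvHandIndex card p2 ≤ 6 := by
  exact pvChainBounds _ _ _ _ _ _

-- distributing fold = per-bucket filters
lemma pvFoldModify {α : Type} (f : α → Int) (hs : List α) :
    ∀ (acc : List (List α)), acc.length = 7 →
    hs.foldl (fun b h => b.modify (f h).toNat (· ++ [h])) acc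
    = (List.range 7).map (fun k => acc.getD k [] ++ hs.filter (fun h => (f h).toNat == k)) := by
  induction hs with
  | nil =>
    intro acc hlen
    apply List.ext_getElem
    · simp [hlen]
    · intro i hi hi'
      simp only [List.length_map, List.length_range] at hi'
      simp only [List.foldl_nil, List.getElem_map, List.getElem_range, List.filter_nil,
        List.append_nil]
      rw [List.getD_eq_getElem acc [] (by omega)]
  | cons h hs ih =>
    intro acc hlen
    rw [List.foldl_cons, ih _ (by simp [hlen])]
    apply List.ext_getElem
    · simp
    · intro i hi hi'
      simp only [List.length_map, List.length_range] at hi hi'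
      have hi7 : i < 7 := by simpa using hi
      simp only [List.getElem_map, List.getElem_range]
      have hmod : (acc.modify (f h).toNat (· ++ [h])).getD i []
          = if (f h).toNat = i then acc.getD i [] ++ [h] else acc.getD i [] := by
        have hilen : i < acc.length := by omega
        rw [List.getD_eq_getElem _ [] (by simpa using hilen), List.getElem_modify]
        rw [List.getD_eq_getElem acc [] hilen]
      rw [hmod, List.filter_cons]
      by_cases hfh : (f h).toNat = i
      · simp [hfh, List.append_assoc]
      · have : ((f h).toNat == i) = false := by simp [hfh]
        simp [hfh, this]

theorem pvFilter_eq (p2 : Bool) (hs : List (String × Int)) (k : Nat) (hk : k < 7) :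
    hs.filter (fun h => (pvIdxA p2 h).toNat == k)
    = hs.filter (fun h => pvHandIndex h.1.toList p2 == (k : Int)) := by
  apply List.filter_congr
  intro h _
  rw [pvIdx_eq]
  obtain ⟨h0, h6⟩ := pvHandIndex_bounds h.1.toList p2
  rw [Bool.eq_iff_iff]
  simp only [beq_iff_eq]
  omega

-- ===== VERDICT (by name: the statement is the Claim_ definition above) =====
theorem categorize_hands_spec : Claim_equal_categorize_hands := by
  unfold Claim_equal_categorize_hands
  intro hands_data is_part_two _
  unfold Spec_categorize_hands categorize_hands categorize_hands_alt
  have hinit : ((PySem.List.pyRange 0 7 1).foldl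
      (fun (acc : List (List (String × Int))) _ => acc ++ [[]]) [])
      = List.replicate 7 ([] : List (String × Int)) := by rfl
  have hstep : (fun (sorted_hands : List (List (String × Int))) (hand : String × Int) =>
      let cc0 := pvBuildCountsA hand.1.toList
      let jokers : Int := if is_part_two then cc0.getD 'J' 0 else 0
      let cc := if is_part_two && cc0.contains 'J' then cc0.erase 'J' else cc0
      let idx := pvFindType cc jokers (PySem.List.pyRange 0 6 1)
      sorted_hands.modify idx.toNat (· ++ [hand]))
      = (fun (b : List (List (String × Int))) (h : String × Int) =>
          b.modify (pvIdxA is_part_two h).toNat (· ++ [h])) := rfl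
  rw [hinit, hstep]
  rw [pvFoldModify (fun h => pvIdxA is_part_two h) hands_data _ (by simp)]
  have hrange : List.range 7 = [0, 1, 2, 3, 4, 5, 6] := by decide
  have hpyr : PySem.List.pyRange 0 7 1 = [0, 1, 2, 3, 4, 5, 6] := by decide
  rw [hrange, hpyr]
  simp only [List.map_cons, List.map_nil, List.getD]
  rw [pvFilter_eq _ _ 0 (by omega), pvFilter_eq _ _ 1 (by omega), pvFilter_eq _ _ 2 (by omega),
      pvFilter_eq _ _ 3 (by omega), pvFilter_eq _ _ 4 (by omega), pvFilter_eq _ _ 5 (by omega),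
      pvFilter_eq _ _ 6 (by omega)]
  simp
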